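-- pv_equiv track=rewrite | github.com/jinuemong/algorithm-data-structure-study | python/Programmers_lv2_2/롤케이크 자르기 2.py | solution
-- ===== SOURCE A (Python) =====
-- from collections import deque
--
-- def solution(topping):
--     answer = 0
--     left_topping,topping =set(),deque(topping.copy())
--     while topping:
--         left_topping.add(topping.popleft())
--         if len(left_topping) == len(set(topping)):
--             answer+=1
--     return answer
-- ===== SOURCE B (Python) =====
-- def solution(topping):
--     right = {}
--     for x in topping:
--         right[x] = right.get(x, 0) + 1
--     r = len(right)
--     left = set()
--     answer = 0
--     for x in topping:
--         left.add(x)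
--         right[x] -= 1
--         if right[x] == 0:
--             r -= 1
--         if len(left) == r:
--             answer += 1
--     return answer
-- ===== Notes on version B (the rewrite author's own statement) =====
-- stated objective: faster
-- what changed: Replaced the per-step set(remaining) recomputation with a precomputed frequency dict plus an integer count of distinct remaining elements, updated incrementally in one pass.
import Mathlib
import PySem

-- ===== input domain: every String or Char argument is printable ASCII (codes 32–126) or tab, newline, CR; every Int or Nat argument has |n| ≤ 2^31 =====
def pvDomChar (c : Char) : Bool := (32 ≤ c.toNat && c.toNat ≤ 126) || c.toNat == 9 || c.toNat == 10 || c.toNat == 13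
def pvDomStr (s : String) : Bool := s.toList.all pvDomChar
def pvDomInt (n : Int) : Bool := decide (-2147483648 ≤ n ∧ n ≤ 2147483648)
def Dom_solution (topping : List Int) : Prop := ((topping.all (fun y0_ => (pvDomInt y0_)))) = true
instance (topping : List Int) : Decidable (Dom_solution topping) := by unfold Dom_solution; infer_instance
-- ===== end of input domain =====

-- B replaces A's O(n^2) re-computation of set(remaining) at every cut by a precomputed
-- frequency dict and an incrementally maintained distinct-count, one O(n) pass.

-- ===== PORT A =====
-- A's while-loop: pop the head into the left set, compare distinct counts.
def solutionLoopA (left : PySem.Set Int) (rest : List Int) (ans : Int) : Int :=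
  match rest with
  | [] => ans
  | x :: xs =>
    let left' := PySem.Set.add left x
    let ans' := if left'.length = (PySem.Set.ofList xs).length then ans + 1 else ans
    solutionLoopA left' xs ans'

def solution (topping : List Int) : Int :=
  solutionLoopA PySem.Set.empty topping 0

-- ===== PORT B =====
-- step of B's single pass: state = (left set, freq dict of remaining, distinct-remaining count, answer)
def solutionStepB (st : PySem.Set Int × PySem.Dict Int Int × Int × Int) (x : Int) :
    PySem.Set Int × PySem.Dict Int Int × Int × Int :=
  let left := PySem.Set.add st.1 x
  let d := st.2.1.insert x (st.2.1.getD x 0 - 1)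
  let r := if d.getD x 0 = 0 then st.2.2.1 - 1 else st.2.2.1
  let ans := if (left.length : Int) = r then st.2.2.2 + 1 else st.2.2.2
  (left, d, r, ans)

def solution_alt (topping : List Int) : Int :=
  let right := topping.foldl (fun d x => d.insert x (d.getD x 0 + 1)) PySem.Dict.empty
  let fin := topping.foldl solutionStepB (PySem.Set.empty, right, (right.size : Int), 0)
  fin.2.2.2

-- ===== PRECONDITION & SPEC =====
def Spec_solution (topping : List Int) (out : Int) : Prop := out = solution_alt topping
instance (topping : List Int) (out : Int) : Decidable (Spec_solution topping out) := by unfold Spec_solution; infer_instance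

-- ===== CLAIM (what is proved, stated in full; the proofs are below) =====
def Claim_equal_solution : Prop := ∀ (topping : List Int), Dom_solution topping → Spec_solution topping (solution topping)

-- ===== LEMMAS AND PROOFS =====

-- the distinct count of a list is the card of its Finset of elements
lemma ofList_length_eq_card (l : List Int) :
    (PySem.Set.ofList l).length = l.toFinset.card := by
  rw [← List.toFinset_card_of_nodup (PySem.Set.nodup_ofList l)]
  congr 1
  ext a
  simp [PySem.Set.mem_ofList]

-- distinct count drops by one exactly when the popped head does not reappear
lemma ofList_length_cons (x : Int) (xs : List Int) :
    (PySem.Set.ofList (x :: xs)).length =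
      (PySem.Set.ofList xs).length + (if x ∈ xs then 0 else 1) := by
  rw [ofList_length_eq_card, ofList_length_eq_card, List.toFinset_cons]
  by_cases h : x ∈ xs
  · simp [Finset.insert_eq_self.mpr (List.mem_toFinset.mpr h), h]
  · rw [Finset.card_insert_of_notMem (by simpa using h)]
    simp [h]

-- main loop invariant: if d counts the remaining suffix and r is its distinct count,
-- B's fold returns what A's loop returns
lemma loop_agree (rest : List Int) (left : PySem.Set Int) (d : PySem.Dict Int Int)
    (r ans : Int)
    (h1 : ∀ k, d.getD k 0 = (rest.count k : Int))
    (h2 : r = ((PySem.Set.ofList rest).length : Int)) :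
    solutionLoopA left rest ans = (rest.foldl solutionStepB (left, d, r, ans)).2.2.2 := by
  induction rest generalizing left d r ans with
  | nil => simp [solutionLoopA]
  | cons x xs ih =>
    rw [List.foldl_cons]
    show solutionLoopA left (x :: xs) ans = (xs.foldl solutionStepB (solutionStepB (left, d, r, ans) x)).2.2.2
    have hdx : (d.insert x (d.getD x 0 - 1)).getD x 0 = (xs.count x : Int) := by
      rw [PySem.Dict.getD_insert_self, h1 x]
      simp
    have hr' : (if (d.insert x (d.getD x 0 - 1)).getD x 0 = 0 then r - 1 else r)
        = ((PySem.Set.ofList xs).length : Int) := by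
      rw [hdx, h2, ofList_length_cons]
      by_cases h : x ∈ xs
      · have hc := List.count_pos_iff.mpr h
        simp [h]
        omega
      · have hc : xs.count x = 0 := List.count_eq_zero.mpr h
        simp [hc, h]
    have h1' : ∀ k, (d.insert x (d.getD x 0 - 1)).getD k 0 = (xs.count k : Int) := by
      intro k
      by_cases hk : k = x
      · subst hk; exact hdx
      · rw [PySem.Dict.getD_insert_of_ne _ _ _ hk, h1 k]
        simp [Ne.symm hk]
    have hstep : solutionStepB (left, d, r, ans) x
        = (PySem.Set.add left x, d.insert x (d.getD x 0 - 1),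
           ((PySem.Set.ofList xs).length : Int),
           (if (PySem.Set.add left x).length = (PySem.Set.ofList xs).length
              then ans + 1 else ans)) := by
      simp only [solutionStepB]
      rw [hr']
      simp [Nat.cast_inj]
    rw [hstep]
    have hA : solutionLoopA left (x :: xs) ans
        = solutionLoopA (PySem.Set.add left x) xs
            (if (PySem.Set.add left x).length = (PySem.Set.ofList xs).length
               then ans + 1 else ans) := by
      rw [solutionLoopA]
    rw [hA]
    exact ih _ _ _ _ h1' rfl

-- ===== VERDICT (by name: the statement is the Claim_ definition above) =====
theorem solution_spec : Claim_equal_solution := by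
  intro topping _
  unfold Spec_solution solution solution_alt
  rw [PySem.Dict.foldl_insert_getD_add_one_eq_counter]
  have hsize : ((PySem.Dict.counter topping).size : Int)
      = ((PySem.Set.ofList topping).length : Int) := by
    have h := PySem.Dict.keys_counter topping
    have : (PySem.Dict.counter topping).size = (PySem.Dict.counter topping).keys.length := by
      simp [PySem.Dict.size, PySem.Dict.keys]
    rw [this, h]
  exact loop_agree topping PySem.Set.empty _ _ 0
    (fun k => PySem.Dict.getD_counter topping k) hsize
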